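-- pv_equiv track=rewrite | github.com/ah9mon/Algorithm_TIL | Algorithm_pract/23-02-08/어디에단어가들어갈수.py | func
-- ===== SOURCE A (Python) =====
-- def func(puzzle,N,K):
--     counts = 0 # 연속된 1을 카운트 하기위한
--     rlt = 0 # 결과를 카운트
--
--     # 한행 다 보고 카운트가 K 이면 rlt + 1
--     for l1 in range(N): # 행
--         for c1 in range(N): # 열
--             if puzzle[l1][c1] : # 1이면
--                 counts += 1
--                 if counts == K and c1 == N-1: # 다음칸이 없으면
--                     rlt += 1
--                 elif counts == K and not puzzle[l1][c1+1]: # 다음 칸이 0 이면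
--                     rlt += 1
--
--             else:
--                 counts = 0
--
--         counts = 0 # 행 끝날 때 재사용을 위해 초기화
--
--     #한호열 다 보고 카운트 K이면 rlt + 1
--
--     for c2 in range(N): # 열
--         for l2 in range(N): # 행
--             if puzzle[l2][c2]:
--                 counts += 1
--                 if counts == K and l2 == N-1: # 다음칸이 없으면
--                     rlt += 1
--                 elif counts == K and not puzzle[l2+1][c2]: # 다음 칸이 0 이면
--                     rlt += 1
--             else:
--                 counts = 0
--         counts = 0 # 열 끝날 때 재사용을 위해 초기화
--
--     return rlt
-- ===== SOURCE B (Python) =====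
-- def run_lengths(line):
--     out = []
--     cur = 0
--     for v in line:
--         if v:
--             cur += 1
--         elif cur:
--             out.append(cur)
--             cur = 0
--     if cur:
--         out.append(cur)
--     return out
--
-- def func(puzzle, N, K):
--     rows = [[puzzle[i][j] for j in range(N)] for i in range(N)]
--     lines = rows + [[row[j] for row in rows] for j in range(N)]
--     return sum(run_lengths(line).count(K) for line in lines)
-- ===== Notes on version B (the rewrite author's own statement) =====
-- stated objective: alternative
-- what changed: B first extracts the N row lines and N column lines of the grid (columns built once by transposition of the extracted rows), decomposes each line into its list of maximal nonzero-run lengths, and counts occurrences of K in those lists, instead of A's two nested index loops with a running counter and a next-cell look-ahead.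
import Mathlib
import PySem

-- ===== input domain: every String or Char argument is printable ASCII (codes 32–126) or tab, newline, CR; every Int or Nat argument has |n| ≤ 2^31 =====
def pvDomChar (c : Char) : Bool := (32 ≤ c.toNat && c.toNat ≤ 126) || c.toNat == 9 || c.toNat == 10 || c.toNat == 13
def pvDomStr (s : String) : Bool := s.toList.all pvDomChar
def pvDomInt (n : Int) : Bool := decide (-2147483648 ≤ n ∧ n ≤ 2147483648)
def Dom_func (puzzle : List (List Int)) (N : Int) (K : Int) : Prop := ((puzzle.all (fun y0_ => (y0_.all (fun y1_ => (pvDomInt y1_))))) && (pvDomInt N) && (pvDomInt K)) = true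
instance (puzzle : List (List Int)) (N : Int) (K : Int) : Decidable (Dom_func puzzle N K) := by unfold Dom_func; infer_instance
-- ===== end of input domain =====

-- B decomposes each row/column line into its list of maximal nonzero-run lengths and counts
-- occurrences of K, instead of A's nested index loops with running counter and next-cell look-ahead.

-- ===== PORT A =====
def func (puzzle : List (List Int)) (N : Int) (K : Int) : Int :=
  let s1 : Int × Int :=
    (PySem.List.pyRange 0 N 1).foldl (fun (s : Int × Int) l1 =>
      (0, ((PySem.List.pyRange 0 N 1).foldl (fun (t : Int × Int) c1 =>
        if PySem.List.pyGetD (PySem.List.pyGetD puzzle l1 []) c1 0 ≠ 0 then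
          if t.1 + 1 = K ∧ c1 = N - 1 then (t.1 + 1, t.2 + 1)
          else if t.1 + 1 = K ∧ PySem.List.pyGetD (PySem.List.pyGetD puzzle l1 []) (c1 + 1) 0 = 0 then (t.1 + 1, t.2 + 1)
          else (t.1 + 1, t.2)
        else (0, t.2)) s).2)) (0, 0)
  let s3 : Int × Int :=
    (PySem.List.pyRange 0 N 1).foldl (fun (s : Int × Int) c2 =>
      (0, ((PySem.List.pyRange 0 N 1).foldl (fun (t : Int × Int) l2 =>
        if PySem.List.pyGetD (PySem.List.pyGetD puzzle l2 []) c2 0 ≠ 0 then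
          if t.1 + 1 = K ∧ l2 = N - 1 then (t.1 + 1, t.2 + 1)
          else if t.1 + 1 = K ∧ PySem.List.pyGetD (PySem.List.pyGetD puzzle (l2 + 1) []) c2 0 = 0 then (t.1 + 1, t.2 + 1)
          else (t.1 + 1, t.2)
        else (0, t.2)) s).2)) s1
  s3.2

-- ===== PORT B =====
def rstep (s : List Int × Int) (v : Int) : List Int × Int :=
  if v ≠ 0 then (s.1, s.2 + 1)
  else if s.2 ≠ 0 then (s.1 ++ [s.2], 0)
  else s

def run_lengths (line : List Int) : List Int :=
  let p : List Int × Int := line.foldl rstep ([], 0)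
  if p.2 ≠ 0 then p.1 ++ [p.2] else p.1

def rows_b (puzzle : List (List Int)) (N : Int) : List (List Int) :=
  (PySem.List.pyRange 0 N 1).map (fun i =>
    (PySem.List.pyRange 0 N 1).map (fun j => PySem.List.pyGetD (PySem.List.pyGetD puzzle i []) j 0))

def func_alt (puzzle : List (List Int)) (N : Int) (K : Int) : Int :=
  ((rows_b puzzle N ++
      (PySem.List.pyRange 0 N 1).map (fun j => (rows_b puzzle N).map (fun row => PySem.List.pyGetD row j 0))).map
    (fun line => (((run_lengths line).count K : Nat) : Int))).sum

-- ===== PRECONDITION & SPEC =====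
-- Pre_: exactly the inputs on which the Python A returns (it raises IndexError when N exceeds
-- the number of rows, or some of the first N rows is shorter than N).
def Pre_func (puzzle : List (List Int)) (N : Int) (K : Int) : Prop :=
  N ≤ puzzle.length ∧ ∀ row ∈ puzzle.take N.toNat, N ≤ row.length
instance (puzzle : List (List Int)) (N : Int) (K : Int) : Decidable (Pre_func puzzle N K) := by
  unfold Pre_func; infer_instance
def pvWitness_func : List (List Int) × Int × Int := ([[1, 0], [1, 1]], 2, 2)
def Spec_func (puzzle : List (List Int)) (N : Int) (K : Int) (out : Int) : Prop := out = func_alt puzzle N K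
instance (puzzle : List (List Int)) (N : Int) (K : Int) (out : Int) : Decidable (Spec_func puzzle N K out) := by
  unfold Spec_func; infer_instance

-- ===== CLAIM (what is proved, stated in full; the proofs are below) =====
def Claim_equal_func : Prop := ∀ (puzzle : List (List Int)) (N : Int) (K : Int), Dom_func puzzle N K → Pre_func puzzle N K → Spec_func puzzle N K (func puzzle N K)

-- ===== LEMMAS AND PROOFS =====

-- A-side per-line scan, as a recursion over the list of line values with current run length c.
def gscan (K : Int) : List Int → Int → Int
  | [], _ => 0
  | x :: r, c =>
      if x ≠ 0 then
        (if c + 1 = K ∧ r = [] then 1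
         else if c + 1 = K ∧ r.headD 0 = 0 then 1 else 0) + gscan K r (c + 1)
      else gscan K r 0

-- B-side run decomposition, as a recursion with current run length c.
def runsFrom : List Int → Int → List Int
  | [], c => if c ≠ 0 then [c] else []
  | x :: r, c =>
      if x ≠ 0 then runsFrom r (c + 1)
      else if c ≠ 0 then c :: runsFrom r 0 else runsFrom r 0

theorem run_lengths_aux : ∀ (xs out : List Int) (c : Int),
    (if (xs.foldl rstep (out, c)).2 ≠ 0
      then (xs.foldl rstep (out, c)).1 ++ [(xs.foldl rstep (out, c)).2]
      else (xs.foldl rstep (out, c)).1) = out ++ runsFrom xs c := by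
  intro xs
  induction xs with
  | nil =>
    intro out c
    simp only [List.foldl_nil, runsFrom]
    split_ifs <;> simp_all
  | cons x r ih =>
    intro out c
    rw [List.foldl_cons]
    by_cases hx : x = 0
    · by_cases hc : c = 0
      · rw [show rstep (out, c) x = (out, c) from by simp [rstep, hx, hc]]
        rw [ih out c, runsFrom, if_neg (by simp [hx]), if_neg (by simp [hc]), hc]
      · rw [show rstep (out, c) x = (out ++ [c], 0) from by simp [rstep, hx, hc]]
        rw [ih (out ++ [c]) 0, runsFrom, if_neg (by simp [hx]), if_pos hc]
        simp
    · rw [show rstep (out, c) x = (out, c + 1) from by simp [rstep, hx]]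
      rw [ih out (c + 1), runsFrom, if_pos hx]

theorem run_lengths_eq (xs : List Int) : run_lengths xs = runsFrom xs 0 := by
  have h := run_lengths_aux xs [] 0
  simpa [run_lengths] using h

theorem gscan_runs (K : Int) : ∀ (xs : List Int) (c : Int), 0 ≤ c →
    gscan K xs c + (if c = K ∧ c ≠ 0 ∧ xs.headD 0 = 0 then 1 else 0)
      = (((runsFrom xs c).count K : Nat) : Int) := by
  intro xs
  induction xs with
  | nil =>
    intro c hc
    simp only [gscan, runsFrom, List.headD_nil, zero_add]
    by_cases hc0 : c = 0
    · simp [hc0]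
    · by_cases hK : c = K
      · have hK0 : ¬ K = 0 := hK ▸ hc0
        simp [hK, hK0]
      · simp [hc0, hK]
  | cons x r ih =>
    intro c hc
    by_cases hx : x = 0
    · rw [show runsFrom (x :: r) c = if c ≠ 0 then c :: runsFrom r 0 else runsFrom r 0 from by
        rw [runsFrom]; simp [hx]]
      rw [show gscan K (x :: r) c = gscan K r 0 from by rw [gscan]; simp [hx]]
      have h0 := ih 0 le_rfl
      rw [if_neg (by simp), add_zero] at h0
      by_cases hc0 : c = 0
      · have hp : (if c = K ∧ c ≠ 0 ∧ (x :: r).headD 0 = 0 then (1 : Int) else 0) = 0 := by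
          simp [hc0]
        rw [hp, add_zero, if_neg (by simp [hc0])]
        exact h0
      · rw [if_pos hc0, List.count_cons]
        by_cases hK : c = K
        · have hp : (if c = K ∧ c ≠ 0 ∧ (x :: r).headD 0 = 0 then (1 : Int) else 0) = 1 :=
            if_pos ⟨hK, hc0, by simp [hx]⟩
          rw [hp]
          push_cast
          rw [← h0]
          simp [hK]
        · have hp : (if c = K ∧ c ≠ 0 ∧ (x :: r).headD 0 = 0 then (1 : Int) else 0) = 0 := by
            simp [hK]
          rw [hp]
          push_cast
          rw [← h0]
          have : ¬ ((c == K) = true) := by simpa using hK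
          simp [this]
    · rw [show runsFrom (x :: r) c = runsFrom r (c + 1) from by rw [runsFrom]; simp [hx]]
      rw [show gscan K (x :: r) c
          = (if c + 1 = K ∧ r = [] then 1
             else if c + 1 = K ∧ r.headD 0 = 0 then 1 else 0) + gscan K r (c + 1) from by
        rw [gscan]; simp [hx]]
      have hp : (if c = K ∧ c ≠ 0 ∧ (x :: r).headD 0 = 0 then (1 : Int) else 0) = 0 := by
        simp [hx]
      rw [hp, add_zero, ← ih (c + 1) (by omega)]
      have h1 : c + 1 ≠ 0 := by omega
      by_cases hK : c + 1 = K
      · by_cases hr : r = []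
        · subst hr
          rw [if_pos ⟨hK, rfl⟩, if_pos ⟨hK, h1, by simp⟩]
          ring
        · by_cases hh : r.headD 0 = 0
          · rw [if_neg (by tauto), if_pos ⟨hK, hh⟩, if_pos ⟨hK, h1, hh⟩]
            ring
          · rw [if_neg (by tauto), if_neg (by tauto), if_neg (by tauto)]
            ring
      · rw [if_neg (by tauto), if_neg (by tauto), if_neg (by tauto)]
        ring

theorem inner_eq (K N : Int) (v : Int → Int) :
    ∀ (fuel : Nat) (a c rlt : Int), a + fuel = N →
      ((PySem.List.pyRange a N 1).foldl (fun (t : Int × Int) j =>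
          if v j ≠ 0 then
            if t.1 + 1 = K ∧ j = N - 1 then (t.1 + 1, t.2 + 1)
            else if t.1 + 1 = K ∧ v (j + 1) = 0 then (t.1 + 1, t.2 + 1)
            else (t.1 + 1, t.2)
          else (0, t.2)) (c, rlt)).2
        = rlt + gscan K ((PySem.List.pyRange a N 1).map v) c := by
  intro fuel
  induction fuel with
  | zero =>
    intro a c rlt ha
    rw [PySem.List.pyRange_one_eq_nil (by omega)]
    simp [gscan]
  | succ n ih =>
    intro a c rlt ha
    rw [PySem.List.pyRange_one_cons (by omega), List.foldl_cons, List.map_cons]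
    by_cases hv : v a = 0
    · rw [show (if v a ≠ 0 then
            if (c, rlt).1 + 1 = K ∧ a = N - 1 then ((c, rlt).1 + 1, (c, rlt).2 + 1)
            else if (c, rlt).1 + 1 = K ∧ v (a + 1) = 0 then ((c, rlt).1 + 1, (c, rlt).2 + 1)
            else ((c, rlt).1 + 1, (c, rlt).2)
          else (0, (c, rlt).2)) = ((0 : Int), rlt) from by simp [hv]]
      rw [ih (a + 1) 0 rlt (by omega)]
      rw [show gscan K (v a :: (PySem.List.pyRange (a + 1) N 1).map v) c
          = gscan K ((PySem.List.pyRange (a + 1) N 1).map v) 0 from by rw [gscan]; simp [hv]]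
    · rw [show (if v a ≠ 0 then
            if (c, rlt).1 + 1 = K ∧ a = N - 1 then ((c, rlt).1 + 1, (c, rlt).2 + 1)
            else if (c, rlt).1 + 1 = K ∧ v (a + 1) = 0 then ((c, rlt).1 + 1, (c, rlt).2 + 1)
            else ((c, rlt).1 + 1, (c, rlt).2)
          else (0, (c, rlt).2))
        = (c + 1, rlt + (if c + 1 = K ∧ ((PySem.List.pyRange (a + 1) N 1).map v) = [] then 1
            else if c + 1 = K ∧ (((PySem.List.pyRange (a + 1) N 1).map v).headD 0) = 0 then 1
            else 0)) from by
        by_cases hn : n = 0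
        · rw [PySem.List.pyRange_one_eq_nil (by omega), List.map_nil]
          have hN : a = N - 1 := by omega
          rw [if_pos hv]
          by_cases hK : c + 1 = K
          · rw [if_pos ⟨hK, hN⟩, if_pos ⟨hK, rfl⟩]
          · rw [if_neg (by tauto), if_neg (by tauto), if_neg (by tauto), if_neg (by tauto)]
            simp
        · rw [PySem.List.pyRange_one_cons (show a + 1 < N by omega)]
          have hN : a ≠ N - 1 := by omega
          by_cases hK : c + 1 = K <;> by_cases hv2 : v (a + 1) = 0 <;>
            simp [hv, hK, hN, hv2]]
      rw [ih (a + 1) (c + 1) _ (by omega)]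
      rw [show gscan K (v a :: (PySem.List.pyRange (a + 1) N 1).map v) c
          = (if c + 1 = K ∧ ((PySem.List.pyRange (a + 1) N 1).map v) = [] then 1
             else if c + 1 = K ∧ (((PySem.List.pyRange (a + 1) N 1).map v).headD 0) = 0 then 1
             else 0) + gscan K ((PySem.List.pyRange (a + 1) N 1).map v) (c + 1) from by
        rw [gscan]; simp [hv]]
      ring

theorem foldl_reset (h : Int → Int → Int) :
    ∀ (l : List Int) (rlt : Int),
      l.foldl (fun (s : Int × Int) x => (0, s.2 + h s.1 x)) (0, rlt)
        = (0, rlt + (l.map (h 0)).sum) := by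
  intro l
  induction l with
  | nil => intro rlt; simp
  | cons x t ih => intro rlt; simp [List.foldl_cons, ih, add_assoc]

theorem gscan_count (K : Int) (line : List Int) :
    (((run_lengths line).count K : Nat) : Int) = gscan K line 0 := by
  have h := gscan_runs K line 0 le_rfl
  rw [if_neg (by simp), add_zero] at h
  rw [run_lengths_eq]
  exact h.symm

theorem func_eq (puzzle : List (List Int)) (N : Int) (K : Int) :
    func puzzle N K = func_alt puzzle N K := by
  by_cases hN : 0 ≤ N
  · have hcov : ∀ (v : Int → Int) (s : Int × Int),
        ((PySem.List.pyRange 0 N 1).foldl (fun (t : Int × Int) j =>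
          if v j ≠ 0 then
            if t.1 + 1 = K ∧ j = N - 1 then (t.1 + 1, t.2 + 1)
            else if t.1 + 1 = K ∧ v (j + 1) = 0 then (t.1 + 1, t.2 + 1)
            else (t.1 + 1, t.2)
          else (0, t.2)) s).2 = s.2 + gscan K ((PySem.List.pyRange 0 N 1).map v) s.1 :=
      fun v s => inner_eq K N v N.toNat 0 s.1 s.2 (by omega)
    have e1 : (PySem.List.pyRange 0 N 1).foldl (fun (s : Int × Int) l1 =>
          ((0 : Int), ((PySem.List.pyRange 0 N 1).foldl (fun (t : Int × Int) c1 =>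
            if PySem.List.pyGetD (PySem.List.pyGetD puzzle l1 []) c1 0 ≠ 0 then
              if t.1 + 1 = K ∧ c1 = N - 1 then (t.1 + 1, t.2 + 1)
              else if t.1 + 1 = K ∧ PySem.List.pyGetD (PySem.List.pyGetD puzzle l1 []) (c1 + 1) 0 = 0 then (t.1 + 1, t.2 + 1)
              else (t.1 + 1, t.2)
            else (0, t.2)) s).2)) ((0 : Int), (0 : Int))
        = (0, 0 + ((PySem.List.pyRange 0 N 1).map ((fun (c : Int) (l1 : Int) =>
            gscan K ((PySem.List.pyRange 0 N 1).map (fun c1 =>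
              PySem.List.pyGetD (PySem.List.pyGetD puzzle l1 []) c1 0)) c) 0)).sum) := by
      have hc : ∀ (acc : Int × Int) (x : Int), x ∈ PySem.List.pyRange 0 N 1 →
          ((0 : Int), ((PySem.List.pyRange 0 N 1).foldl (fun (t : Int × Int) c1 =>
            if PySem.List.pyGetD (PySem.List.pyGetD puzzle x []) c1 0 ≠ 0 then
              if t.1 + 1 = K ∧ c1 = N - 1 then (t.1 + 1, t.2 + 1)
              else if t.1 + 1 = K ∧ PySem.List.pyGetD (PySem.List.pyGetD puzzle x []) (c1 + 1) 0 = 0 then (t.1 + 1, t.2 + 1)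
              else (t.1 + 1, t.2)
            else (0, t.2)) acc).2)
          = ((0 : Int), acc.2 + (fun (c : Int) (l1 : Int) =>
              gscan K ((PySem.List.pyRange 0 N 1).map (fun c1 =>
                PySem.List.pyGetD (PySem.List.pyGetD puzzle l1 []) c1 0)) c) acc.1 x) :=
        fun acc x _ => congrArg (fun z => ((0 : Int), z))
          (hcov (fun c1 => PySem.List.pyGetD (PySem.List.pyGetD puzzle x []) c1 0) acc)
      calc _ = _ := PySem.List.foldl_congr_mem _ _ _ _ (fun acc x hx => hc acc x hx)
        _ = _ := foldl_reset (fun (c : Int) (l1 : Int) =>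
            gscan K ((PySem.List.pyRange 0 N 1).map (fun c1 =>
              PySem.List.pyGetD (PySem.List.pyGetD puzzle l1 []) c1 0)) c)
          (PySem.List.pyRange 0 N 1) 0
    have e2 : ∀ (rlt : Int), (PySem.List.pyRange 0 N 1).foldl (fun (s : Int × Int) c2 =>
          ((0 : Int), ((PySem.List.pyRange 0 N 1).foldl (fun (t : Int × Int) l2 =>
            if PySem.List.pyGetD (PySem.List.pyGetD puzzle l2 []) c2 0 ≠ 0 then
              if t.1 + 1 = K ∧ l2 = N - 1 then (t.1 + 1, t.2 + 1)
              else if t.1 + 1 = K ∧ PySem.List.pyGetD (PySem.List.pyGetD puzzle (l2 + 1) []) c2 0 = 0 then (t.1 + 1, t.2 + 1)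
              else (t.1 + 1, t.2)
            else (0, t.2)) s).2)) ((0 : Int), rlt)
        = (0, rlt + ((PySem.List.pyRange 0 N 1).map ((fun (c : Int) (c2 : Int) =>
            gscan K ((PySem.List.pyRange 0 N 1).map (fun l2 =>
              PySem.List.pyGetD (PySem.List.pyGetD puzzle l2 []) c2 0)) c) 0)).sum) := by
      intro rlt
      have hc : ∀ (acc : Int × Int) (x : Int), x ∈ PySem.List.pyRange 0 N 1 →
          ((0 : Int), ((PySem.List.pyRange 0 N 1).foldl (fun (t : Int × Int) l2 =>
            if PySem.List.pyGetD (PySem.List.pyGetD puzzle l2 []) x 0 ≠ 0 then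
              if t.1 + 1 = K ∧ l2 = N - 1 then (t.1 + 1, t.2 + 1)
              else if t.1 + 1 = K ∧ PySem.List.pyGetD (PySem.List.pyGetD puzzle (l2 + 1) []) x 0 = 0 then (t.1 + 1, t.2 + 1)
              else (t.1 + 1, t.2)
            else (0, t.2)) acc).2)
          = ((0 : Int), acc.2 + (fun (c : Int) (c2 : Int) =>
              gscan K ((PySem.List.pyRange 0 N 1).map (fun l2 =>
                PySem.List.pyGetD (PySem.List.pyGetD puzzle l2 []) c2 0)) c) acc.1 x) :=
        fun acc x _ => congrArg (fun z => ((0 : Int), z))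
          (hcov (fun l2 => PySem.List.pyGetD (PySem.List.pyGetD puzzle l2 []) x 0) acc)
      calc _ = _ := PySem.List.foldl_congr_mem _ _ _ _ (fun acc x hx => hc acc x hx)
        _ = _ := foldl_reset (fun (c : Int) (c2 : Int) =>
            gscan K ((PySem.List.pyRange 0 N 1).map (fun l2 =>
              PySem.List.pyGetD (PySem.List.pyGetD puzzle l2 []) c2 0)) c)
          (PySem.List.pyRange 0 N 1) rlt
    have hB : func_alt puzzle N K
        = ((PySem.List.pyRange 0 N 1).map (fun l1 =>
            gscan K ((PySem.List.pyRange 0 N 1).map (fun c1 =>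
              PySem.List.pyGetD (PySem.List.pyGetD puzzle l1 []) c1 0)) 0)).sum
          + ((PySem.List.pyRange 0 N 1).map (fun c2 =>
            gscan K ((PySem.List.pyRange 0 N 1).map (fun l2 =>
              PySem.List.pyGetD (PySem.List.pyGetD puzzle l2 []) c2 0)) 0)).sum := by
      unfold func_alt rows_b
      rw [List.map_append, List.sum_append, List.map_map, List.map_map]
      congr 1
      · exact congrArg _ (List.map_congr_left (fun i _ => gscan_count K _))
      · refine congrArg _ (List.map_congr_left (fun j hj => ?_))
        have hj' := (PySem.List.mem_pyRange_one).1 hj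
        have hline : ((PySem.List.pyRange 0 N 1).map (fun i =>
              (PySem.List.pyRange 0 N 1).map (fun j' =>
                PySem.List.pyGetD (PySem.List.pyGetD puzzle i []) j' 0))).map (fun row =>
                PySem.List.pyGetD row j 0)
            = (PySem.List.pyRange 0 N 1).map (fun l2 =>
                PySem.List.pyGetD (PySem.List.pyGetD puzzle l2 []) j 0) := by
          rw [List.map_map]
          exact List.map_congr_left (fun i _ =>
            PySem.List.pyGetD_map_pyRange_of_nonneg _ N j 0 hj'.1 hj'.2)
        show (((run_lengths (((PySem.List.pyRange 0 N 1).map (fun i =>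
              (PySem.List.pyRange 0 N 1).map (fun j' =>
                PySem.List.pyGetD (PySem.List.pyGetD puzzle i []) j' 0))).map (fun row =>
                PySem.List.pyGetD row j 0))).count K : Nat) : Int) = _
        rw [hline]
        exact gscan_count K _
    show ((PySem.List.pyRange 0 N 1).foldl (fun (s : Int × Int) c2 =>
          ((0 : Int), ((PySem.List.pyRange 0 N 1).foldl (fun (t : Int × Int) l2 =>
            if PySem.List.pyGetD (PySem.List.pyGetD puzzle l2 []) c2 0 ≠ 0 then
              if t.1 + 1 = K ∧ l2 = N - 1 then (t.1 + 1, t.2 + 1)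
              else if t.1 + 1 = K ∧ PySem.List.pyGetD (PySem.List.pyGetD puzzle (l2 + 1) []) c2 0 = 0 then (t.1 + 1, t.2 + 1)
              else (t.1 + 1, t.2)
            else (0, t.2)) s).2))
        ((PySem.List.pyRange 0 N 1).foldl (fun (s : Int × Int) l1 =>
          ((0 : Int), ((PySem.List.pyRange 0 N 1).foldl (fun (t : Int × Int) c1 =>
            if PySem.List.pyGetD (PySem.List.pyGetD puzzle l1 []) c1 0 ≠ 0 then
              if t.1 + 1 = K ∧ c1 = N - 1 then (t.1 + 1, t.2 + 1)
              else if t.1 + 1 = K ∧ PySem.List.pyGetD (PySem.List.pyGetD puzzle l1 []) (c1 + 1) 0 = 0 then (t.1 + 1, t.2 + 1)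
              else (t.1 + 1, t.2)
            else (0, t.2)) s).2)) ((0 : Int), (0 : Int)))).2 = func_alt puzzle N K
    rw [e1, e2, hB]
    simp
  · have he : PySem.List.pyRange 0 N 1 = [] := PySem.List.pyRange_one_eq_nil (by omega)
    unfold func func_alt rows_b
    rw [he]
    simp

-- ===== VERDICT (by name: the statement is the Claim_ definition above) =====
theorem func_spec : Claim_equal_func := by
  intro puzzle N K _ _
  unfold Spec_func
  exact func_eq puzzle N K
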